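-- pv_equiv track=rewrite | github.com/EFord36/normalise | splitter.py | mixedalnum_split
-- ===== SOURCE A (Python) =====
-- digits = ['0', '1', '2', '3', '4', '5', '6', '7', '8', '9']
--
-- def mixedalnum_split(nsw):
--     """ Split tokens on transitions from letters to numbers or numbers to
--     letters.
--     """
--     if nsw.isalnum():
--         out = []
--         ind = 0
--         if nsw[0] in digits:
--             cat = 'num'
--         else:
--             cat = 'let'
--         for i in range(1, len(nsw)):
--             if nsw[i] in digits:
--                 if cat == 'num':
--                     pass
--                 else:
--                     out.append(nsw[ind:i])
--                     cat = 'num'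
--                     ind = i
--             else:
--                 if cat == 'let':
--                     pass
--                 else:
--                     out.append(nsw[ind:i])
--                     cat = 'let'
--                     ind = i
--         out.append(nsw[ind:])
--         return out
--     else:
--         return [nsw]
-- ===== SOURCE B (Python) =====
-- digits = ['0', '1', '2', '3', '4', '5', '6', '7', '8', '9']
--
-- def mixedalnum_split(nsw):
--     """ Split tokens on letter/digit transitions by repeatedly slicing off
--     the maximal leading run of same-category characters.
--     """
--     if not nsw.isalnum():
--         return [nsw]
--     out = []
--     i = 0
--     while i < len(nsw):
--         j = i + 1
--         while j < len(nsw) and (nsw[j] in digits) == (nsw[i] in digits):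
--             j += 1
--         out.append(nsw[i:j])
--         i = j
--     return out
-- ===== Notes on version B (the rewrite author's own statement) =====
-- stated objective: alternative
-- what changed: Replaced A's single-pass category/start-index state machine (tracking cat and ind across an index loop) by repeatedly slicing off the maximal leading run of characters that agree on the digit test.
import Mathlib
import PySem

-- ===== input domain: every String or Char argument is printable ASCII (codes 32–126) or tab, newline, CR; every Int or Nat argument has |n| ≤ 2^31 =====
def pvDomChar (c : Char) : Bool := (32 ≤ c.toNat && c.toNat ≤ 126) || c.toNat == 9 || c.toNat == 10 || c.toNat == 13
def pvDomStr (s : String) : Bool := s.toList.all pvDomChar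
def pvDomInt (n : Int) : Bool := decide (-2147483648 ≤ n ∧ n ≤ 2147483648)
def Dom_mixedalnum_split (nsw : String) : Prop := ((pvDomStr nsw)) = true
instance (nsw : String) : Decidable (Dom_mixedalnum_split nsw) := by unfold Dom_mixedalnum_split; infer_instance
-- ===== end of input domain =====

-- B replaces A's category/start-index state machine by repeatedly slicing off the maximal
-- leading same-category run (objective: alternative; same cost).

-- ===== PORT A =====
def pvDigits : List Char := ['0', '1', '2', '3', '4', '5', '6', '7', '8', '9']

-- body of A's `for i in range(1, len(nsw))` loop; state = (out, cat, ind)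
def pvStepA (l : List Char) (st : List String × String × Int) (i : Int) :
    List String × String × Int :=
  if pvDigits.contains (PySem.List.pyGetD l i ' ') then
    if st.2.1 == "num" then st
    else (st.1 ++ [String.ofList (PySem.List.slice l (some st.2.2) (some i))], "num", i)
  else
    if st.2.1 == "let" then st
    else (st.1 ++ [String.ofList (PySem.List.slice l (some st.2.2) (some i))], "let", i)

def mixedalnum_split (nsw : String) : List String :=
  let l := nsw.toList
  if PySem.Chars.strIsalnum l then
    -- `nsw[0]` is reached only under the isalnum guard, so l ≠ [] and the ' ' default of pyGetD is unreachable
    let cat : String := if pvDigits.contains (PySem.List.pyGetD l 0 ' ') then "num" else "let"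
    let st := (PySem.List.pyRange 1 (l.length : Int) 1).foldl (pvStepA l) ([], cat, (0 : Int))
    st.1 ++ [String.ofList (PySem.List.slice l (some st.2.2) none)]
  else [nsw]

-- ===== PORT B =====
def pvDigitsB : List Char := ['0', '1', '2', '3', '4', '5', '6', '7', '8', '9']

-- B's outer while loop: peel off the maximal leading run agreeing on the digit test
-- (the inner `while j < len(nsw) and …: j += 1` scan is the takeWhile)
def pvRuns (l : List Char) : List (List Char) :=
  match l with
  | [] => []
  | c :: rest =>
      (c :: rest.takeWhile (fun x => pvDigitsB.contains x == pvDigitsB.contains c)) ::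
        pvRuns (rest.dropWhile (fun x => pvDigitsB.contains x == pvDigitsB.contains c))
termination_by l.length
decreasing_by
  simp only [List.length_cons]
  have := List.length_dropWhile_le (fun x => pvDigitsB.contains x == pvDigitsB.contains c) rest
  omega

def mixedalnum_split_alt (nsw : String) : List String :=
  if PySem.Chars.strIsalnum nsw.toList then (pvRuns nsw.toList).map String.ofList
  else [nsw]

-- ===== PRECONDITION & SPEC =====
def Spec_mixedalnum_split (nsw : String) (out : List String) : Prop := out = mixedalnum_split_alt nsw
instance (nsw : String) (out : List String) : Decidable (Spec_mixedalnum_split nsw out) := by unfold Spec_mixedalnum_split; infer_instance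

-- ===== CLAIM (what is proved, stated in full; the proofs are below) =====
def Claim_equal_mixedalnum_split : Prop := ∀ (nsw : String), Dom_mixedalnum_split nsw → Spec_mixedalnum_split nsw (mixedalnum_split nsw)

-- ===== LEMMAS AND PROOFS =====

-- proof-side abbreviations
lemma pvDigitsB_eq : pvDigitsB = pvDigits := rfl

def pvCatOf (b : Bool) : String := if b then "num" else "let"

def pvFinish (l : List Char) (st : List String × String × Int) : List String :=
  st.1 ++ [String.ofList (PySem.List.slice l (some st.2.2) none)]

lemma pvStepA_same (l : List Char) (out : List String) (d : Bool) (ind i : Int)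
    (h : pvDigits.contains (PySem.List.pyGetD l i ' ') = d) :
    pvStepA l (out, pvCatOf d, ind) i = (out, pvCatOf d, ind) := by
  cases d <;> simp_all [pvStepA, pvCatOf]

lemma pvStepA_flip (l : List Char) (out : List String) (d : Bool) (ind i : Int)
    (h : pvDigits.contains (PySem.List.pyGetD l i ' ') = !d) :
    pvStepA l (out, pvCatOf d, ind) i =
      (out ++ [String.ofList (PySem.List.slice l (some ind) (some i))], pvCatOf (!d), i) := by
  cases d <;> simp_all [pvStepA, pvCatOf]

lemma pvFoldl_fixed {α β : Type} (f : α → β → α) (st : α) :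
    ∀ xs : List β, (∀ x ∈ xs, f st x = st) → xs.foldl f st = st := by
  intro xs
  induction xs with
  | nil => intro _; rfl
  | cons x xs ih =>
      intro h
      simp only [List.foldl_cons, h x (by simp)]
      exact ih (fun y hy => h y (by simp [hy]))

lemma pvDrop_takeWhile (p : Char → Bool) (l : List Char) :
    l.drop (l.takeWhile p).length = l.dropWhile p := by
  induction l with
  | nil => simp
  | cons c t ih =>
    by_cases hc : p c = true
    · simp [List.takeWhile, List.dropWhile, hc, ih]
    · simp only [Bool.not_eq_true] at hc
      simp [List.takeWhile, List.dropWhile, hc]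

lemma pvTakeWhile_getElem? (p : Char → Bool) (l : List Char) (k : Nat)
    (h : k < (l.takeWhile p).length) : l[k]? = (l.takeWhile p)[k]? := by
  obtain ⟨t, ht⟩ := List.takeWhile_prefix (l := l) p
  conv_lhs => rw [← ht, List.getElem?_append_left h]

lemma pvDropWhile_head (p : Char → Bool) (l : List Char) (c : Char) (t : List Char)
    (h : l.dropWhile p = c :: t) : p c = false := by
  have hne : l.dropWhile p ≠ [] := by simp [h]
  have h2 := List.head_dropWhile_not (l := l) p hne
  have h3 : (l.dropWhile p).head hne = c := by simp [h]
  rw [h3] at h2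
  simpa using h2

lemma pvMain : ∀ (fuel : Nat) (l : List Char) (j : Nat) (out : List String),
    l.length - j ≤ fuel → j < l.length →
    pvFinish l ((PySem.List.pyRange ((j : Int) + 1) (l.length : Int) 1).foldl (pvStepA l)
        (out, pvCatOf (pvDigits.contains (l.getD j ' ')), (j : Int)))
      = out ++ (pvRuns (l.drop j)).map String.ofList := by
  intro fuel
  induction fuel with
  | zero => intro l j out hf hj; omega
  | succ fuel ih =>
    intro l j out hf hj
    rw [List.getD_eq_getElem l ' ' hj]
    set c := l[j] with hc
    set d := pvDigits.contains c with hd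
    set p : Char → Bool := fun x => pvDigits.contains x == pvDigits.contains c with hp
    set t := (l.drop (j+1)).takeWhile p with ht
    set r := t.length with hr
    have hrle : r ≤ l.length - (j+1) := by
      have h1 : t <+: l.drop (j+1) := List.takeWhile_prefix p
      have h2 := h1.length_le
      simpa using h2
    have hdropj : l.drop j = c :: l.drop (j+1) := List.drop_eq_getElem_cons hj
    have hsame : ∀ k : Nat, j+1 ≤ k → k < j+1+r → pvDigits.contains (l.getD k ' ') = d := by
      intro k h1 h2
      have hk : k - (j+1) < t.length := by omega
      have hklen : k < l.length := by omega
      have he : (l.drop (j+1))[k - (j+1)]? = t[k - (j+1)]? :=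
        pvTakeWhile_getElem? p (l.drop (j+1)) _ hk
      have he2 : l[k]? = t[k - (j+1)]? := by
        rw [← he, List.getElem?_drop]
        congr 1
        omega
      have hmem : t[k - (j+1)] ∈ t := List.getElem_mem hk
      have hpk : p (t[k - (j+1)]) = true := List.mem_takeWhile_imp hmem
      have hgk : l[k] = t[k - (j+1)] := by
        rw [List.getElem?_eq_getElem hklen, List.getElem?_eq_getElem hk] at he2
        exact Option.some.inj he2
      rw [List.getD_eq_getElem l ' ' hklen, hgk]
      simp only [hp, beq_iff_eq] at hpk
      rw [hd, hpk]
    have hdrop_after : l.drop (j+1+r) = (l.drop (j+1)).dropWhile p := by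
      rw [← pvDrop_takeWhile p (l.drop (j+1)), List.drop_drop, ← ht, ← hr]
    have hruns : pvRuns (l.drop j) = (c :: t) :: pvRuns (l.drop (j+1+r)) := by
      rw [hdropj, pvRuns, pvDigitsB_eq, hdrop_after]
    have hsplit : PySem.List.pyRange ((j : Int) + 1) (l.length : Int) 1
        = PySem.List.pyRange ((j : Int) + 1) ((j : Int) + 1 + (r : Int)) 1
          ++ PySem.List.pyRange ((j : Int) + 1 + (r : Int)) (l.length : Int) 1 :=
      PySem.List.pyRange_one_append _ _ _ (by omega) (by omega)
    have hfix : (PySem.List.pyRange ((j : Int) + 1) ((j : Int) + 1 + (r : Int)) 1).foldl (pvStepA l)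
        (out, pvCatOf d, (j : Int)) = (out, pvCatOf d, (j : Int)) := by
      apply pvFoldl_fixed
      intro i hi
      rw [PySem.List.mem_pyRange_one] at hi
      apply pvStepA_same
      rw [PySem.List.pyGetD_of_nonneg l ' ' (by omega)]
      exact hsame i.toNat (by omega) (by omega)
    rw [hsplit, List.foldl_append, hfix]
    rcases Nat.lt_or_ge (j+1+r) l.length with hlt | hge
    · -- a later run follows: the loop transitions at index j+1+r
      rw [PySem.List.pyRange_one_cons (show (j : Int) + 1 + (r : Int) < (l.length : Int) by omega)]
      rw [List.foldl_cons]
      have hdc : l.drop (j+1+r) = l[j+1+r] :: l.drop (j+1+r+1) := List.drop_eq_getElem_cons hlt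
      have hpfalse : p (l[j+1+r]) = false :=
        pvDropWhile_head p (l.drop (j+1)) _ _ (by rw [← hdrop_after, hdc])
      have hcontra : pvDigits.contains l[j+1+r] = !d := by
        simp only [hp, beq_eq_false_iff_ne] at hpfalse
        rw [hd]
        exact Bool.eq_not_of_ne hpfalse
      have hhead : pvDigits.contains (PySem.List.pyGetD l ((j : Int) + 1 + (r : Int)) ' ') = !d := by
        rw [PySem.List.pyGetD_of_nonneg l ' ' (by omega)]
        rw [show ((j : Int) + 1 + (r : Int)).toNat = j+1+r by omega]
        rw [List.getD_eq_getElem l ' ' hlt]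
        exact hcontra
      rw [pvStepA_flip l out d _ _ hhead]
      have hslice : PySem.List.slice l (some (j : Int)) (some ((j : Int) + 1 + (r : Int)))
          = c :: t := by
        rw [PySem.List.slice_toNat l (by omega) (by omega)]
        rw [show ((j : Int)).toNat = j by omega,
            show ((j : Int) + 1 + (r : Int)).toNat = j+1+r by omega]
        rw [show j+1+r - j = r+1 by omega, hdropj, List.take_succ_cons]
        obtain ⟨u, hu⟩ := List.takeWhile_prefix (l := l.drop (j+1)) p
        rw [← ht] at hu
        rw [← hu, hr, List.take_left]
      rw [hslice]
      have hcat : pvDigits.contains (l.getD (j+1+r) ' ') = !d := by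
        rw [List.getD_eq_getElem l ' ' hlt]
        exact hcontra
      have hih := ih l (j+1+r) (out ++ [String.ofList (c :: t)]) (by omega) hlt
      rw [hcat] at hih
      push_cast at hih
      rw [show (j : Int) + 1 + (r : Int) + 1 = (j : Int) + (1 : Int) + (r : Int) + 1 from rfl] at hih
      unfold pvFinish at hih ⊢
      rw [hih, hruns]
      simp
    · -- the first run reaches the end of the string
      have heq : j+1+r = l.length := by omega
      rw [PySem.List.pyRange_one_eq_nil (by omega), List.foldl_nil]
      unfold pvFinish
      rw [PySem.List.slice_from l (Int.natCast_nonneg j)]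
      rw [show ((j : Int)).toNat = j by omega]
      have hteq : l.drop (j+1) = t := by
        have hpre : t <+: l.drop (j+1) := List.takeWhile_prefix p
        exact (hpre.eq_of_length (by simp [← hr]; omega)).symm
      have hnil : l.drop (j+1+r) = [] := by
        rw [heq, List.drop_length]
      rw [hruns, hnil, pvRuns]
      rw [hdropj, hteq]
      simp

theorem pv_eq (nsw : String) : mixedalnum_split nsw = mixedalnum_split_alt nsw := by
  unfold mixedalnum_split mixedalnum_split_alt
  by_cases hg : PySem.Chars.strIsalnum nsw.toList = true
  · have hne : nsw.toList ≠ [] := by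
      intro h
      rw [h] at hg
      exact absurd hg (by decide)
    have hlen : 0 < nsw.toList.length := List.length_pos_iff.mpr hne
    have hm := pvMain nsw.toList.length nsw.toList 0 [] (by omega) hlen
    unfold pvFinish at hm
    simp only [Nat.cast_zero, zero_add, List.drop_zero, List.nil_append] at hm
    simp only [hg, if_pos]
    have hget : PySem.List.pyGetD nsw.toList 0 ' ' = nsw.toList.getD 0 ' ' := by
      simpa using PySem.List.pyGetD_natCast nsw.toList 0 ' '
    rw [hget]
    show pvFinish nsw.toList
        ((PySem.List.pyRange 1 (nsw.toList.length : Int) 1).foldl (pvStepA nsw.toList)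
          ([], pvCatOf (pvDigits.contains (nsw.toList.getD 0 ' ')), (0 : Int)))
      = (pvRuns nsw.toList).map String.ofList
    unfold pvFinish
    exact hm
  · simp [hg]

-- ===== VERDICT (by name: the statement is the Claim_ definition above) =====
theorem mixedalnum_split_spec : Claim_equal_mixedalnum_split := by
  intro nsw _
  unfold Spec_mixedalnum_split
  exact pv_eq nsw
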